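-- pv_equiv track=rewrite | github.com/ArneBinder/pie-modules | src/pie_modules/utils/sequence_tagging/encoding.py | iob2_tags_to_spans
-- ===== SOURCE A (Python) =====
-- from typing import List, Optional, Tuple
--
-- TypedStringSpan = Tuple[str, Tuple[int, int]]
--
-- def iob2_tags_to_spans(
--     tag_sequence: List[str],
--     classes_to_ignore: Optional[List[str]] = None,
-- ) -> List[TypedStringSpan]:
--     """Given a sequence corresponding to BIO or IOB2 tags, extracts spans. Spans are inclusive and
--     can be of zero length, representing a single word span.
--
--     # Parameters
--     tag_sequence : `List[str]`, required.
--         The integer class labels for a sequence.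
--     classes_to_ignore : `List[str]`, optional (default = `None`).
--         A list of string class labels `excluding` the IOB2 tag
--         which should be ignored when extracting the spans.
--     # Returns
--     spans : `List[TypedStringSpan]`
--         The typed, extracted spans from the sequence, in the format (label, (span_start, span_end_inclusive)).
--         Note that the label `does not` contain any IOB2 tag prefixes.
--     """
--     spans = []
--     classes_to_ignore = classes_to_ignore or []
--     index = 0
--     while index < len(tag_sequence):
--         label = tag_sequence[index]
--         if label[0] == "B":
--             start = index
--             current_span_label = label.partition("-")[2]
--             index += 1
--             if index < len(tag_sequence):
--                 label = tag_sequence[index]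
--             else:
--                 # if B is last tag in the sequence
--                 spans.append((current_span_label, (start, start)))
--                 continue
--             if label[0] == "B":
--                 # if Ba Bb or Ba Ba
--                 spans.append((current_span_label, (start, start)))
--                 continue
--             while label[0] == "I" and index < len(tag_sequence):
--                 # loop can end if it encounters another B or O or end of tag_sequence
--                 index += 1
--                 if index < len(tag_sequence):
--                     label = tag_sequence[index]
--             index -= 1
--             end = index
--             spans.append((current_span_label, (start, end)))
--         index += 1
--     return [span for span in spans if span[0] not in classes_to_ignore]
-- ===== SOURCE B (Python) =====
-- def iob2_tags_to_spans(tag_sequence, classes_to_ignore=None):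
--     ignore = classes_to_ignore or []
--     spans = []
--     open_start = None
--     open_label = None
--     for i, label in enumerate(tag_sequence):
--         if label.startswith("B"):
--             if open_start is not None:
--                 spans.append((open_label, (open_start, i - 1)))
--             open_start = i
--             open_label = label.partition("-")[2]
--         elif label.startswith("I"):
--             pass  # extends the open span if any; stray I's are ignored
--         else:
--             if open_start is not None:
--                 spans.append((open_label, (open_start, i - 1)))
--                 open_start = None
--     if open_start is not None:
--         spans.append((open_label, (open_start, len(tag_sequence) - 1)))
--     return [s for s in spans if s[0] not in ignore]
-- ===== Notes on version B (the rewrite author's own statement) =====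
-- stated objective: alternative
-- what changed: A's shared-index while-loop with an inner lookahead while over I-tags and index rewinding is replaced by a single flat enumerate loop that keeps an 'open span' (start,label) state and emits spans at boundaries (B, non-I tag, or end of sequence).
import Mathlib
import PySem

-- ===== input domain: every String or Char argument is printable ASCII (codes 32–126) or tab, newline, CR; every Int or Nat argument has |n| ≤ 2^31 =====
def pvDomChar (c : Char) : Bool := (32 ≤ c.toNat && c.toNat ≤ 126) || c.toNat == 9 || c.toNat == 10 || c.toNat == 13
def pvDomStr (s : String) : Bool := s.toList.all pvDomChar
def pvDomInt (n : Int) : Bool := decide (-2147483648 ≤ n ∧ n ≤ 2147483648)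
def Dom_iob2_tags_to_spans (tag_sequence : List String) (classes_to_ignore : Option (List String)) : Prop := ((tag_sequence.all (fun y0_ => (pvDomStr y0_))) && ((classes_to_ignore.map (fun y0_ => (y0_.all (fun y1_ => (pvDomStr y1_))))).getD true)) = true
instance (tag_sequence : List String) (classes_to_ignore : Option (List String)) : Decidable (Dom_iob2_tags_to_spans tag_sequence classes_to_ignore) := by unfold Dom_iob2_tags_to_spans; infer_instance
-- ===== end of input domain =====

-- B replaces A's nested index-juggling while-loops (inner lookahead over I-tags, index rewind)
-- by one flat enumerate loop with an "open span" state and deferred boundary emission: objective 'alternative'.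

-- shared library-call helper: label.partition("-")[2] for the single-char separator "-"
-- (everything after the first '-', or "" if no '-'); exact on all strings.
def pvAfterDash (s : String) : String :=
  String.ofList ((s.toList.dropWhile (fun c => c != '-')).drop 1)

-- ===== PORT A =====
-- inner 'while label[0] == "I" and index < len(tag_sequence)' loop of A, returning the final index
def pvAInner (tags : List String) (index : Nat) (label : String) : Nat :=
  if h : PySem.Str.pyGet? label 0 = some 'I' ∧ index < tags.length then
    let index' := index + 1
    let label' := if index' < tags.length then tags.getD index' "" else label
    pvAInner tags index' label'
  else index
termination_by tags.length - index
decreasing_by exact Nat.sub_succ_lt_self _ _ h.2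

-- A's port needs this bound for termination of the outer loop (index strictly advances).
theorem pvAInner_le (tags : List String) (index : Nat) (label : String) :
    index ≤ pvAInner tags index label := by
  fun_induction pvAInner tags index label with
  | case1 index label h index' label' ih => exact Nat.le_trans (Nat.le_succ index) ih
  | case2 index label h => exact Nat.le_refl index

-- outer 'while index < len(tag_sequence)' loop of A, accumulating spans
def pvALoop (tags : List String) (index : Nat) (spans : List (String × (Int × Int))) :
    List (String × (Int × Int)) :=
  if h : index < tags.length then
    let label := tags.getD index ""
    if PySem.Str.pyGet? label 0 = some 'B' then
      let start := index
      let cur := pvAfterDash label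
      let index1 := index + 1
      if h2 : index1 < tags.length then
        let label1 := tags.getD index1 ""
        if PySem.Str.pyGet? label1 0 = some 'B' then
          -- if Ba Bb or Ba Ba: append (start,start), continue
          pvALoop tags index1 (spans ++ [(cur, ((start : Int), (start : Int)))])
        else
          let index2 := pvAInner tags index1 label1
          let index3 := index2 - 1
          pvALoop tags (index3 + 1) (spans ++ [(cur, ((start : Int), ((index3 : Nat) : Int)))])
      else
        -- if B is last tag in the sequence
        pvALoop tags index1 (spans ++ [(cur, ((start : Int), (start : Int)))])
    else
      pvALoop tags (index + 1) spans
  else spans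
termination_by tags.length - index
decreasing_by
  · exact Nat.sub_succ_lt_self _ _ h
  · refine Nat.sub_lt_sub_left h ?_
    have hp := pvAInner_le tags (index + 1) (tags.getD (index + 1) "")
    rw [Nat.sub_add_cancel (Nat.le_trans (Nat.succ_le_succ (Nat.zero_le _)) hp)]
    exact Nat.lt_of_lt_of_le (Nat.lt_succ_self _) hp
  · exact Nat.sub_succ_lt_self _ _ h
  · exact Nat.sub_succ_lt_self _ _ h

def iob2_tags_to_spans (tag_sequence : List String) (classes_to_ignore : Option (List String)) :
    List (String × (Int × Int)) :=
  -- 'classes_to_ignore or []': for None use []; an empty list has the same members as []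
  let ignore := classes_to_ignore.getD []
  (pvALoop tag_sequence 0 []).filter (fun sp => !ignore.contains sp.1)

-- ===== PORT B =====
-- one step of B's flat for-loop: state = (spans, open span as Option (start, label))
def pvBStep (st : List (String × (Int × Int)) × Option (Int × String)) (p : Int × String) :
    List (String × (Int × Int)) × Option (Int × String) :=
  if PySem.Str.startswith p.2 "B" then
    ((match st.2 with
      | some (s, l) => st.1 ++ [(l, (s, p.1 - 1))]
      | none => st.1), some (p.1, pvAfterDash p.2))
  else if PySem.Str.startswith p.2 "I" then
    st  -- extends the open span if any; stray I's are ignored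
  else
    ((match st.2 with
      | some (s, l) => st.1 ++ [(l, (s, p.1 - 1))]
      | none => st.1), none)

def iob2_tags_to_spans_alt (tag_sequence : List String) (classes_to_ignore : Option (List String)) :
    List (String × (Int × Int)) :=
  let ignore := classes_to_ignore.getD []
  let st := (PySem.List.enumerate tag_sequence 0).foldl pvBStep ([], none)
  let spans := match st.2 with
    | some (s, l) => st.1 ++ [(l, (s, ((tag_sequence.length : Int) - 1)))]
    | none => st.1
  spans.filter (fun sp => !ignore.contains sp.1)

-- ===== PRECONDITION & SPEC =====
-- Pre_ excludes sequences containing an empty-string tag: Python A evaluates label[0] on every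
-- tag and raises IndexError there (it never returns).
def Pre_iob2_tags_to_spans (tag_sequence : List String) (classes_to_ignore : Option (List String)) : Prop :=
  ∀ s ∈ tag_sequence, s ≠ ""
instance (tag_sequence : List String) (classes_to_ignore : Option (List String)) : Decidable (Pre_iob2_tags_to_spans tag_sequence classes_to_ignore) := by unfold Pre_iob2_tags_to_spans; infer_instance

def pvWitness_iob2_tags_to_spans : List String × Option (List String) :=
  (["B-PER", "I-PER", "O"], some ["LOC"])

def Spec_iob2_tags_to_spans (tag_sequence : List String) (classes_to_ignore : Option (List String)) (out : List (String × (Int × Int))) : Prop := out = iob2_tags_to_spans_alt tag_sequence classes_to_ignore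
instance (tag_sequence : List String) (classes_to_ignore : Option (List String)) (out : List (String × (Int × Int))) : Decidable (Spec_iob2_tags_to_spans tag_sequence classes_to_ignore out) := by unfold Spec_iob2_tags_to_spans; infer_instance

-- ===== CLAIM (what is proved, stated in full; the proofs are below) =====
def Claim_equal_iob2_tags_to_spans : Prop := ∀ (tag_sequence : List String) (classes_to_ignore : Option (List String)), Dom_iob2_tags_to_spans tag_sequence classes_to_ignore → Pre_iob2_tags_to_spans tag_sequence classes_to_ignore → Spec_iob2_tags_to_spans tag_sequence classes_to_ignore (iob2_tags_to_spans tag_sequence classes_to_ignore)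

-- ===== LEMMAS AND PROOFS =====

-- B's loop, run from position i with state st (proof-side recursive reading of B's foldl)
def pvBRun (tags : List String) (i : Nat) (st : List (String × (Int × Int)) × Option (Int × String)) :
    List (String × (Int × Int)) :=
  if h : i < tags.length then
    pvBRun tags (i + 1) (pvBStep st ((i : Int), tags.getD i ""))
  else
    match st.2 with
    | some (s, l) => st.1 ++ [(l, (s, ((tags.length : Int) - 1)))]
    | none => st.1
termination_by tags.length - i
decreasing_by exact Nat.sub_succ_lt_self _ _ h

theorem pv_startswith_iff (s p : String) (c : Char) (hp : p.toList = [c]) :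
    (PySem.Str.startswith s p = true) ↔ PySem.Str.pyGet? s 0 = some c := by
  have h1 : PySem.Str.startswith s p = PySem.Chars.startswith s.toList p.toList := by simp
  rw [h1, hp, PySem.Chars.startswith_iff]
  have h2 : PySem.Str.pyGet? s (0 : Int) = s.toList[(0 : Nat)]? := PySem.Str.pyGet?_natCast s 0
  rw [h2]
  cases s.toList with
  | nil => simp
  | cons a t => simp [List.cons_prefix_iff]

theorem pvBRun_foldl (tags : List String) : ∀ (suf pre : List String)
    (st : List (String × (Int × Int)) × Option (Int × String)), tags = pre ++ suf →
    pvBRun tags pre.length st =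
      (match (List.foldl pvBStep st (PySem.List.enumerate suf (pre.length : Int))).2 with
       | some (s, l) => (List.foldl pvBStep st (PySem.List.enumerate suf (pre.length : Int))).1
            ++ [(l, (s, ((tags.length : Int) - 1)))]
       | none => (List.foldl pvBStep st (PySem.List.enumerate suf (pre.length : Int))).1) := by
  intro suf
  induction suf with
  | nil =>
    intro pre st h
    rw [pvBRun, dif_neg (by simp [h])]
    simp [PySem.List.enumerate_nil]
  | cons x xs ih =>
    intro pre st h
    rw [pvBRun]
    have hlen : pre.length < tags.length := by simp [h]
    rw [dif_pos hlen]
    have hget : tags.getD pre.length "" = x := by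
      subst h
      rw [List.getD, List.getElem?_append_right (le_refl _)]
      simp
    rw [hget]
    have hrec := ih (pre ++ [x]) (pvBStep st ((pre.length : Int), x)) (by simp [h])
    simp only [List.length_append, List.length_singleton] at hrec
    rw [hrec, PySem.List.enumerate_cons]
    have hc : ((pre.length : Int) + 1) = (((pre.length + 1 : Nat)) : Int) := by push_cast; ring
    rw [List.foldl_cons, hc]

theorem pvAInner_le_len (tags : List String) (index : Nat) (label : String)
    (h : index ≤ tags.length) : pvAInner tags index label ≤ tags.length := by
  fun_induction pvAInner tags index label <;> omega

theorem pvAInner_not_I (tags : List String) : ∀ (index : Nat) (label : String),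
    (index < tags.length → label = tags.getD index "") →
    pvAInner tags index label < tags.length →
    ¬ PySem.Str.pyGet? (tags.getD (pvAInner tags index label) "") 0 = some 'I' := by
  intro index label
  fun_induction pvAInner tags index label with
  | case1 index label h index' label' ih =>
    intro hinv hlt
    apply ih
    · intro hlt'
      show (if _ : index' < tags.length then tags.getD index' "" else label) = tags.getD index' ""
      rw [dif_pos hlt']
    · exact hlt
  | case2 index label h =>
    intro hinv hlt
    rw [← hinv hlt]
    intro hI
    exact h ⟨hI, hlt⟩

theorem pvBRun_skipI (tags : List String) : ∀ (index : Nat) (label : String)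
    (spans : List (String × (Int × Int))) (s : Int) (l : String),
    (index < tags.length → label = tags.getD index "") →
    pvBRun tags index (spans, some (s, l)) =
      pvBRun tags (pvAInner tags index label) (spans, some (s, l)) := by
  intro index label
  fun_induction pvAInner tags index label with
  | case1 index label h index' label' ih =>
    intro spans s l hinv
    rw [pvBRun, dif_pos h.2]
    have hlab : tags.getD index "" = label := (hinv h.2).symm
    have hnB : ¬ (PySem.Str.startswith label "B" = true) := by
      rw [pv_startswith_iff label "B" 'B' (by decide), h.1]
      decide
    have hI : PySem.Str.startswith label "I" = true := by
      rw [pv_startswith_iff label "I" 'I' (by decide)]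
      exact h.1
    have hstep : pvBStep (spans, some (s, l)) ((index : Int), tags.getD index "") = (spans, some (s, l)) := by
      simp only [pvBStep, hlab]
      rw [if_neg hnB, if_pos hI]
    rw [hstep]
    apply ih
    intro hlt'
    show (if _ : index' < tags.length then tags.getD index' "" else label) = tags.getD index' ""
    rw [dif_pos hlt']
  | case2 index label h =>
    intro spans s l hinv
    rfl

theorem pvBRun_close (tags : List String) (i : Nat) (spans : List (String × (Int × Int)))
    (s : Int) (l : String) (hi : i < tags.length)
    (hni : ¬ PySem.Str.pyGet? (tags.getD i "") 0 = some 'I') :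
    pvBRun tags i (spans, some (s, l)) =
      pvBRun tags i (spans ++ [(l, (s, (i : Int) - 1))], none) := by
  conv_lhs => rw [pvBRun]
  conv_rhs => rw [pvBRun]
  rw [dif_pos hi, dif_pos hi]
  congr 1
  have hnI : ¬ (PySem.Str.startswith (tags.getD i "") "I" = true) := by
    rw [pv_startswith_iff (tags.getD i "") "I" 'I' (by decide)]
    exact hni
  by_cases hB : PySem.Str.startswith (tags.getD i "") "B" = true
  · simp only [pvBStep]
    rw [if_pos hB, if_pos hB]
  · simp only [pvBStep]
    rw [if_neg hB, if_neg hB, if_neg hnI, if_neg hnI]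

theorem pvALoop_eq_pvBRun (tags : List String) : ∀ (i : Nat) (spans : List (String × (Int × Int))),
    pvALoop tags i spans = pvBRun tags i (spans, none) := by
  intro i spans
  fun_induction pvALoop tags i spans with
  | case1 index spans h label hB start cur index1 h2 label1 hB1 ih =>
    -- B tag immediately followed by another B
    rw [ih]
    conv_rhs => rw [pvBRun, dif_pos h]
    have hBsw : PySem.Str.startswith (tags.getD index "") "B" = true := by
      rw [pv_startswith_iff (tags.getD index "") "B" 'B' (by decide)]
      exact hB
    have hstep : pvBStep (spans, none) ((index : Int), tags.getD index "") =
        (spans, some ((index : Int), pvAfterDash (tags.getD index ""))) := by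
      simp only [pvBStep]
      rw [if_pos hBsw]
    rw [hstep]
    have hclose := pvBRun_close tags index1 spans (index : Int) (pvAfterDash (tags.getD index "")) h2
      (by rw [hB1]; decide)
    have hc : ((index1 : Nat) : Int) - 1 = (index : Int) := by
      show ((index + 1 : Nat) : Int) - 1 = (index : Int)
      push_cast; ring
    rw [hc] at hclose
    exact hclose.symm
  | case2 index spans h label hB start cur index1 h2 label1 hB1 index2 index3 ih =>
    -- B tag followed by a non-B tag: A's inner while skips the I-run
    conv_rhs => rw [pvBRun, dif_pos h]
    have hBsw : PySem.Str.startswith (tags.getD index "") "B" = true := by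
      rw [pv_startswith_iff (tags.getD index "") "B" 'B' (by decide)]
      exact hB
    have hstep : pvBStep (spans, none) ((index : Int), tags.getD index "") =
        (spans, some ((index : Int), pvAfterDash (tags.getD index ""))) := by
      simp only [pvBStep]
      rw [if_pos hBsw]
    rw [hstep]
    have hinv : index1 < tags.length → label1 = tags.getD index1 "" := fun _ => rfl
    rw [pvBRun_skipI tags index1 label1 spans (index : Int) (pvAfterDash (tags.getD index "")) hinv]
    have h1le : index1 ≤ pvAInner tags index1 label1 := pvAInner_le tags index1 label1
    have hlen : pvAInner tags index1 label1 ≤ tags.length :=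
      pvAInner_le_len tags index1 label1 (by omega)
    by_cases hc : pvAInner tags index1 label1 < tags.length
    · have hnI := pvAInner_not_I tags index1 label1 hinv hc
      rw [pvBRun_close tags (pvAInner tags index1 label1) spans (index : Int)
        (pvAfterDash (tags.getD index "")) hc hnI]
      have he3 : ((index3 : Nat) : Int) = ((pvAInner tags index1 label1 : Nat) : Int) - 1 := by
        show (((pvAInner tags index1 label1 - 1 : Nat)) : Int) = _
        omega
      have he4 : index3 + 1 = pvAInner tags index1 label1 := by
        show pvAInner tags index1 label1 - 1 + 1 = _
        omega
      rw [ih, he3, he4]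
    · have hEq : pvAInner tags index1 label1 = tags.length := by omega
      rw [hEq, pvBRun]
      rw [dif_neg (by omega)]
      rw [ih]
      have he4 : index3 + 1 = tags.length := by
        show pvAInner tags index1 label1 - 1 + 1 = _
        omega
      have he3 : ((index3 : Nat) : Int) = ((tags.length : Nat) : Int) - 1 := by
        show (((pvAInner tags index1 label1 - 1 : Nat)) : Int) = _
        omega
      rw [he3, he4, pvBRun, dif_neg (by omega)]
  | case3 index spans h label hB start cur index1 h2 ih =>
    -- B is the last tag in the sequence
    rw [ih]
    conv_rhs => rw [pvBRun, dif_pos h]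
    have hBsw : PySem.Str.startswith (tags.getD index "") "B" = true := by
      rw [pv_startswith_iff (tags.getD index "") "B" 'B' (by decide)]
      exact hB
    have hstep : pvBStep (spans, none) ((index : Int), tags.getD index "") =
        (spans, some ((index : Int), pvAfterDash (tags.getD index ""))) := by
      simp only [pvBStep]
      rw [if_pos hBsw]
    rw [hstep]
    conv_rhs => rw [pvBRun, dif_neg h2]
    conv_lhs => rw [pvBRun, dif_neg h2]
    have hi1 : index1 = tags.length := by
      show index + 1 = tags.length
      omega
    have hc : ((tags.length : Nat) : Int) - 1 = (index : Int) := by omega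
    rw [hc]
  | case4 index spans h label hB ih =>
    -- non-B tag with no open span: both sides skip it
    rw [ih]
    conv_rhs => rw [pvBRun, dif_pos h]
    have hnB : ¬ (PySem.Str.startswith (tags.getD index "") "B" = true) := by
      rw [pv_startswith_iff (tags.getD index "") "B" 'B' (by decide)]
      exact hB
    have hstep : pvBStep (spans, none) ((index : Int), tags.getD index "") = (spans, none) := by
      simp only [pvBStep]
      rw [if_neg hnB]
      by_cases hI : PySem.Str.startswith (tags.getD index "") "I" = true
      · rw [if_pos hI]
      · rw [if_neg hI]
    rw [hstep]
  | case5 index spans h =>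
    rw [pvBRun, dif_neg h]

-- ===== VERDICT (by name: the statement is the Claim_ definition above) =====
theorem iob2_tags_to_spans_spec : Claim_equal_iob2_tags_to_spans := by
  intro tags cti _ _
  unfold Spec_iob2_tags_to_spans iob2_tags_to_spans iob2_tags_to_spans_alt
  have h := pvBRun_foldl tags tags [] ([], none) rfl
  simp only [List.length_nil, Nat.cast_zero] at h
  rw [pvALoop_eq_pvBRun tags 0 [], h]
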